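-- pv_equiv track=rewrite | github.com/Synell/App-Manager | data/lib/widgets/InstalledButton.py | small_path
-- ===== SOURCE A (Python) =====
-- def small_path(path: str) -> str:
--     limit = 5
--     folders = path.split('/')
--     if len(folders) > limit:
--         start = ''
--         end = ''
--         for i in range(limit // 2):
--             start += f'{folders[i]}/'
--             end = f'/{folders[-i - 1] + end}'
--         return f'{start}{(folders[i + 1] + "/") if limit % 2 else ""}...{end}'
--
--     return path
-- ===== SOURCE B (Python) =====
-- def small_path(path: str) -> str:
--     folders = path.split('/')
--     if len(folders) > 5:
--         return '/'.join(folders[:3]) + '/.../' + '/'.join(folders[-2:])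
--     return path
-- ===== Notes on version B (the rewrite author's own statement) =====
-- stated objective: simpler
-- what changed: Replaces the two-accumulator counted loop (plus the leaked loop variable for the middle segment) by a single expression: slice the first three and last two segments and join them around the ellipsis segment.
import Mathlib
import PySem

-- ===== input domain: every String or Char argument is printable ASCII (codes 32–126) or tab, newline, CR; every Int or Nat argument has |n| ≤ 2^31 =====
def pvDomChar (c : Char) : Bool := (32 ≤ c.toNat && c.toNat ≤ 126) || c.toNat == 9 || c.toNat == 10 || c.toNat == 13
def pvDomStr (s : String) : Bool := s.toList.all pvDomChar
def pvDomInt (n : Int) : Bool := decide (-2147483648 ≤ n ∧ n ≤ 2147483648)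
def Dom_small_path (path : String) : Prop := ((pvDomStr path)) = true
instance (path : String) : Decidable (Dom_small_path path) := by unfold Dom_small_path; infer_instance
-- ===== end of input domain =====

-- B replaces A's two-accumulator counted loop by slicing off the first three and last two
-- segments and joining them around the ellipsis segment (objective: simpler).

-- ===== PORT A =====
-- Transliteration of A: limit = 5; folders = path.split('/'); a counted loop over
-- range(limit // 2) building `start` forward and `end` by prepending; after the loop the
-- Python loop variable i equals 1, so `folders[i + 1]` is `folders[2]` (written 2 below).
-- Indexing: Python `folders[j]` raises when out of range; inside the taken branch
-- folders.length ≥ 6, so every index used is in range and the `.getD ""` default of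
-- `pyGet?` is never consulted (A is total).
def small_path (path : String) : String :=
  let limit : Int := 5
  let folders : List String := (PySem.Str.split? path "/").getD []
  if (folders.length : Int) > limit then
    let se := (PySem.List.pyRange 0 (PySem.Int.floordiv limit 2) 1).foldl
      (fun (acc : String × String) i =>
        (acc.1 ++ ((PySem.List.pyGet? folders i).getD "" ++ "/"),
         "/" ++ ((PySem.List.pyGet? folders (-i - 1)).getD "" ++ acc.2))) ("", "")
    se.1 ++ (if PySem.Int.mod limit 2 ≠ 0 then (PySem.List.pyGet? folders 2).getD "" ++ "/" else "")
      ++ "..." ++ se.2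
  else
    path

-- ===== PORT B =====
-- Transliteration of B (Source B): slice folders[:3] and folders[-2:], join around the ellipsis.
def small_path_alt (path : String) : String :=
  let folders : List String := (PySem.Str.split? path "/").getD []
  if folders.length > 5 then
    PySem.Str.join "/" (PySem.List.slice folders none (some 3)) ++ "/.../" ++
      PySem.Str.join "/" (PySem.List.slice folders (some (-2)) none)
  else
    path

-- ===== PRECONDITION & SPEC =====
def Spec_small_path (path : String) (out : String) : Prop := out = small_path_alt path
instance (path : String) (out : String) : Decidable (Spec_small_path path out) := by unfold Spec_small_path; infer_instance

-- ===== CLAIM (what is proved, stated in full; the proofs are below) =====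
def Claim_equal_small_path : Prop := ∀ (path : String), Dom_small_path path → Spec_small_path path (small_path path)

-- ===== LEMMAS AND PROOFS =====

lemma pyIdx?_of_nonneg_lt {n : Nat} {i : Int} (h0 : 0 ≤ i) (h1 : i < (n : Int)) :
    PySem.List.pyIdx? n i = some i.toNat := by
  unfold PySem.List.pyIdx?
  rw [if_pos h0, if_pos h1]

lemma pyIdx?_of_neg {n : Nat} {i : Int} (h0 : i < 0) (h1 : -(n : Int) ≤ i) :
    PySem.List.pyIdx? n i = some (n - (-i).toNat) := by
  unfold PySem.List.pyIdx?
  rw [if_neg (by omega), if_pos h1]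

lemma pyGet?_getD_nonneg (fs : List String) (i : Int) (h0 : 0 ≤ i) (h1 : i < (fs.length : Int)) :
    (PySem.List.pyGet? fs i).getD "" = fs[i.toNat]'(by omega) := by
  unfold PySem.List.pyGet?
  rw [pyIdx?_of_nonneg_lt h0 h1]
  simp [List.getElem?_eq_getElem (show i.toNat < fs.length by omega)]

lemma pyGet?_getD_neg (fs : List String) (i : Int) (h0 : i < 0) (h1 : -(fs.length : Int) ≤ i) :
    (PySem.List.pyGet? fs i).getD "" = fs[fs.length - (-i).toNat]'(by omega) := by
  unfold PySem.List.pyGet?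
  rw [pyIdx?_of_neg h0 h1]
  simp [List.getElem?_eq_getElem (show fs.length - (-i).toNat < fs.length by omega)]

lemma take_three (fs : List String) (h : 5 < fs.length) :
    fs.take 3 = [fs[0]'(by omega), fs[1]'(by omega), fs[2]'(by omega)] := by
  apply List.ext_getElem
  · simp; omega
  · intro i h1 h2
    simp only [List.getElem_take]
    have hi : i < 3 := by simpa using h2
    interval_cases i <;> rfl

lemma drop_last_two (fs : List String) (h : 5 < fs.length) :
    fs.drop (fs.length - 2) = [fs[fs.length - 2]'(by omega), fs[fs.length - 1]'(by omega)] := by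
  rw [List.drop_eq_getElem_cons (by omega), List.drop_eq_getElem_cons (by omega)]
  have e1 : fs.length - 2 + 1 = fs.length - 1 := by omega
  have e2 : fs.length - 2 + 1 + 1 = fs.length := by omega
  rw [e2, List.drop_length]
  simp only [e1]

lemma ports_eq (path : String) : small_path path = small_path_alt path := by
  simp only [small_path, small_path_alt]
  set fs : List String := (PySem.Str.split? path "/").getD [] with hfs
  by_cases h : 5 < fs.length
  · have hInt : ((fs.length : Int) > 5) := by exact_mod_cast h
    rw [if_pos hInt, if_pos h]
    have hr : PySem.List.pyRange 0 (PySem.Int.floordiv 5 2) 1 = [0, 1] := by decide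
    have hm : PySem.Int.mod 5 2 = 1 := by decide
    rw [hr, hm]
    simp only [List.foldl_cons, List.foldl_nil]
    rw [if_pos (by norm_num : (1 : Int) ≠ 0)]
    have hsl1 : PySem.List.slice fs none (some 3) = fs.take 3 := by simp [pysem]
    have hsl2 : PySem.List.slice fs (some (-2)) none = fs.drop (fs.length - 2) := by
      rw [PySem.List.slice_from_neg_ofNat fs 2 (by norm_num)]
    rw [hsl1, hsl2, take_three fs h, drop_last_two fs h]
    have e0 := pyGet?_getD_nonneg fs 0 (by norm_num) (by omega)
    have e1 := pyGet?_getD_nonneg fs 1 (by norm_num) (by omega)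
    have e2 := pyGet?_getD_nonneg fs 2 (by norm_num) (by omega)
    have em1 := pyGet?_getD_neg fs (-0 - 1) (by norm_num) (by omega)
    have em2 := pyGet?_getD_neg fs (-1 - 1) (by norm_num) (by omega)
    norm_num at e0 e1 e2 em1 em2
    simp only [show Int.toNat 2 = 2 from rfl] at e2 em2
    rw [← String.toList_inj]
    have l1 : "/".toList = ['/'] := rfl
    have l2 : "...".toList = ['.', '.', '.'] := rfl
    have l3 : "/.../".toList = ['/', '.', '.', '.', '/'] := rfl
    simp [String.toList_append, PySem.Str.toList_join, PySem.Chars.join, List.intercalate,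
      List.intersperse, l1, l2, l3, List.append_assoc, e0, e1, e2, em1, em2]
  · have hInt : ¬ ((fs.length : Int) > 5) := by omega
    rw [if_neg hInt, if_neg h]

-- ===== VERDICT (by name: the statement is the Claim_ definition above) =====
theorem small_path_spec : Claim_equal_small_path := by
  intro path _
  unfold Spec_small_path
  exact ports_eq path
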